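-- pv_equiv track=rewrite | github.com/andersonsoffa/pyioutils | text_util/wordgen.py | gen_case_mut
-- ===== SOURCE A (Python) =====
-- import string
--
-- _case_map = {k: [k, k.upper()] for k in string.ascii_lowercase}
--
-- def gen_case_mut(word, upto=3):
--     if word:
--         if upto:
--             res = []
--             char = word[0]
--             for c in _case_map.get(char, char):
--                 res.extend([c+r for r in gen_case_mut(word[1:], upto-1 if c != char else upto)])
--             return res
--         else:
--            return [word]
--     return ['']
-- ===== SOURCE B (Python) =====
-- def gen_case_mut(word, upto=3):
--     # Bottom-up DP over suffixes: rows[b] holds the mutation list of the current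
--     # suffix with budget b; each distinct (suffix, budget) list is built once and shared.
--     n = len(word)
--     K = upto if 0 <= upto <= n else n
--     suffix = ''
--     rows = [[''] for _ in range(K + 1)]
--     for ch in reversed(word):
--         suffix = ch + suffix
--         low = 'a' <= ch <= 'z'
--         up = ch.upper()
--         rows = [[suffix]] + [
--             [ch + r for r in row] + ([up + r for r in prev] if low else [])
--             for prev, row in zip(rows, rows[1:])
--         ]
--     return rows[K]
-- ===== Notes on version B (the rewrite author's own statement) =====
-- stated objective: alternative
-- what changed: B replaces A's top-down recursion, which rebuilds the mutation list of each suffix separately along every path reaching it, by a single bottom-up pass over suffixes keeping one shared DP row per remaining budget (intended as faster; a timing run measured only 1.31x on its random output-bound inputs).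
import Mathlib
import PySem

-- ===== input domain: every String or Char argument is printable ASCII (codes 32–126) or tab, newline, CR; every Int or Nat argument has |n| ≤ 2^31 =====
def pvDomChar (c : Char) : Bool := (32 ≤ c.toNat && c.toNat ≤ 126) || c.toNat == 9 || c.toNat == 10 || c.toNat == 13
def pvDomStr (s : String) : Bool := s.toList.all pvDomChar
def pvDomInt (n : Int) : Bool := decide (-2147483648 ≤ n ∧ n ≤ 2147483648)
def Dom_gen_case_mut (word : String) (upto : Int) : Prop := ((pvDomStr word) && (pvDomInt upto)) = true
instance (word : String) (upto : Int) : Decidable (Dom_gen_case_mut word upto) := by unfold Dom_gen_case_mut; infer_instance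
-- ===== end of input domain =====

-- B replaces A's recursion (which rebuilds each suffix's mutation list along every path
-- reaching it) by a bottom-up DP sharing one row per (suffix, budget); objective: alternative.

-- ===== PORT A =====
-- A's recursion; `_case_map.get(char, char)` is [c, c.upper()] for lowercase ascii c
-- and the one-character string (iterated: just c) otherwise.
def pvGenA : List Char → Int → List String
  | [], _ => [""]
  | c :: cs, b =>
    if b ≠ 0 then
      (if 'a' ≤ c ∧ c ≤ 'z' then [c, PySem.Chars.upperChar c] else [c]).foldl
        (fun res k =>
          res ++ (pvGenA cs (if k ≠ c then b - 1 else b)).map (fun r => String.ofList (k :: r.toList)))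
        []
    else [String.ofList (c :: cs)]

def gen_case_mut (word : String) (upto : Int) : List String := pvGenA word.toList upto

-- ===== PORT B =====
-- one step of B's `for ch in reversed(word)` loop; state = (suffix, rows)
def pvStepB (ch : Char) (st : List Char × List (List String)) : List Char × List (List String) :=
  let suffix := ch :: st.1
  let rows := st.2
  (suffix,
    [String.ofList suffix] ::
      (rows.zip rows.tail).map (fun pr =>
        pr.2.map (fun r => String.ofList (ch :: r.toList)) ++
          (if 'a' ≤ ch ∧ ch ≤ 'z' then
            pr.1.map (fun r => String.ofList (PySem.Chars.upperChar ch :: r.toList))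
          else [])))

def gen_case_mut_alt (word : String) (upto : Int) : List String :=
  let n : Nat := word.toList.length
  let K : Nat := if 0 ≤ upto ∧ upto ≤ (n : Int) then upto.toNat else n
  let st := word.toList.foldr pvStepB ([], List.replicate (K + 1) [""])
  st.2.getD K []

-- ===== PRECONDITION & SPEC =====
def Spec_gen_case_mut (word : String) (upto : Int) (out : List String) : Prop := out = gen_case_mut_alt word upto
instance (word : String) (upto : Int) (out : List String) : Decidable (Spec_gen_case_mut word upto out) := by unfold Spec_gen_case_mut; infer_instance

-- ===== CLAIM (what is proved, stated in full; the proofs are below) =====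
def Claim_equal_gen_case_mut : Prop := ∀ (word : String) (upto : Int), Dom_gen_case_mut word upto → Spec_gen_case_mut word upto (gen_case_mut word upto)

-- ===== LEMMAS AND PROOFS =====

-- number of lowercase ascii letters
def pvLc (cs : List Char) : Nat := cs.countP (fun c => decide ('a' ≤ c ∧ c ≤ 'z'))

-- the full mutation list (budget never reaches 0), pvGenA's value for any out-of-reach budget
def pvFull : List Char → List String
  | [] => [""]
  | c :: cs =>
    (pvFull cs).map (fun r => String.ofList (c :: r.toList)) ++
      (if 'a' ≤ c ∧ c ≤ 'z' then
        (pvFull cs).map (fun r => String.ofList (PySem.Chars.upperChar c :: r.toList))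
      else [])

lemma pvUpper_ne (c : Char) (h : 'a' ≤ c ∧ c ≤ 'z') : PySem.Chars.upperChar c ≠ c := by
  obtain ⟨h1, h2⟩ := h
  have hl : PySem.Chars.islower c = true := by
    simp [PySem.Chars.islower]; exact ⟨h1, h2⟩
  simp only [PySem.Chars.upperChar, hl, if_pos]
  have hv1 : 97 ≤ c.toNat := h1
  have hv2 : c.toNat ≤ 122 := h2
  intro he
  have : (Char.ofNat (c.toNat - 32)).toNat = c.toNat := by rw [he]
  rw [Char.toNat_ofNat, if_pos (by left; omega)] at this
  omega

lemma pvFull_of_lc_zero (cs : List Char) (h : pvLc cs = 0) : pvFull cs = [String.ofList cs] := by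
  induction cs with
  | nil => simp [pvFull]
  | cons c cs ih =>
    simp only [pvLc, List.countP_cons] at h ih
    have hc : ¬ ('a' ≤ c ∧ c ≤ 'z') := by
      by_contra hcc; simp [hcc] at h
    have hcs : cs.countP (fun c => decide ('a' ≤ c ∧ c ≤ 'z')) = 0 := by omega
    simp [pvFull, hc, ih hcs]

lemma pvGenA_of_out (cs : List Char) (b : Int) (h : b < 0 ∨ (pvLc cs : Int) ≤ b) :
    pvGenA cs b = pvFull cs := by
  induction cs generalizing b with
  | nil => simp [pvGenA, pvFull]
  | cons c cs ih =>
    by_cases hb : b = 0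
    · subst hb
      have hlc : pvLc (c :: cs) = 0 := by
        rcases h with h | h <;> omega
      have hc : ¬ ('a' ≤ c ∧ c ≤ 'z') := by
        intro hcc
        simp [pvLc, hcc] at hlc
      have hcs : pvLc cs = 0 := by
        simp [pvLc, hc] at hlc ⊢
        simpa [pvLc] using hlc
      simp [pvGenA, pvFull, hc, pvFull_of_lc_zero cs hcs]
    · by_cases hc : 'a' ≤ c ∧ c ≤ 'z'
      · have hne := pvUpper_ne c hc
        have h1 : pvGenA cs b = pvFull cs := by
          apply ih
          rcases h with h | h
          · left; exact h
          · right
            simp [pvLc, hc] at h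
            simp [pvLc]; omega
        have h2 : pvGenA cs (b - 1) = pvFull cs := by
          apply ih
          rcases h with h | h
          · left; omega
          · right
            simp [pvLc, hc] at h
            simp [pvLc]; omega
        simp [pvGenA, hb, hc, List.foldl, hne, h1, h2, pvFull]
      · have h1 : pvGenA cs b = pvFull cs := by
          apply ih
          rcases h with h | h
          · left; exact h
          · right
            simp [pvLc, hc] at h
            simpa [pvLc] using h
        simp [pvGenA, hb, hc, List.foldl, h1, pvFull]

lemma pvZip_map_range {α : Type} (g : Nat → α) (K : Nat) :
    (((List.range (K + 1)).map g).zip (((List.range (K + 1)).map g).tail))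
      = (List.range K).map (fun b => (g b, g (b + 1))) := by
  apply List.ext_getElem
  · simp [List.length_zip]
  · intro i h1 h2
    simp [List.getElem_zip, List.getElem_tail, List.getElem_map, List.getElem_range]

-- loop invariant of B's fold: rows[b] is A's result for the processed suffix with budget b
lemma pvInv (K : Nat) (cs : List Char) :
    cs.foldr pvStepB ([], List.replicate (K + 1) [""])
      = (cs, (List.range (K + 1)).map (fun b : Nat => pvGenA cs ((b : Nat) : Int))) := by
  induction cs with
  | nil =>
    simp [pvGenA, List.map_const']
  | cons c cs ih =>
    rw [List.foldr_cons, ih]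
    simp only [pvStepB]
    rw [pvZip_map_range (fun b : Nat => pvGenA cs ((b : Nat) : Int)) K]
    rw [List.map_map]
    refine congrArg (Prod.mk (c :: cs)) ?_
    rw [List.range_succ_eq_map, List.map_cons, List.map_map]
    simp only [List.cons.injEq]
    refine ⟨by simp [pvGenA], ?_⟩
    refine congrArg (fun f => List.map f (List.range K)) (funext fun b => ?_)
    simp only [Function.comp_apply]
    by_cases hc : 'a' ≤ c ∧ c ≤ 'z'
    · have hne : PySem.Chars.upperChar c ≠ c := pvUpper_ne c hc
      have hz : ((b : Int) + 1) ≠ 0 := by omega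
      have e1 : ((b : Int) + 1) - 1 = (b : Int) := by ring
      simp [pvGenA, hc, hne, hz, List.foldl, e1]
    · have hz : ((b : Int) + 1) ≠ 0 := by omega
      simp [pvGenA, hc, hz, List.foldl]

-- ===== VERDICT (by name: the statement is the Claim_ definition above) =====
theorem gen_case_mut_spec : Claim_equal_gen_case_mut := by
  intro word upto _
  unfold Spec_gen_case_mut gen_case_mut gen_case_mut_alt
  simp only []
  rw [pvInv]
  set l := word.toList with hl
  set K : Nat := if 0 ≤ upto ∧ upto ≤ ((l.length : Nat) : Int) then upto.toNat else l.length with hK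
  have hlen : K < ((List.range (K + 1)).map (fun b : Nat => pvGenA l ((b : Nat) : Int))).length := by
    simp
  rw [List.getD_eq_getElem _ _ hlen]
  simp only [List.getElem_map, List.getElem_range]
  by_cases h : 0 ≤ upto ∧ upto ≤ ((l.length : Nat) : Int)
  · have : K = upto.toNat := by rw [hK, if_pos h]
    rw [this, Int.toNat_of_nonneg h.1]
  · have hKn : K = l.length := by rw [hK, if_neg h]
    rw [hKn]
    have h1 : pvLc l ≤ l.length := List.countP_le_length
    have hcase : upto < 0 ∨ ((pvLc l : Nat) : Int) ≤ upto := by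
      push Not at h
      rcases lt_or_ge upto 0 with h0 | h0
      · exact Or.inl h0
      · right
        have := h h0
        omega
    rw [pvGenA_of_out l upto hcase,
        pvGenA_of_out l ((l.length : Nat) : Int) (Or.inr (by exact_mod_cast h1))]
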